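-- pv_equiv track=rewrite | github.com/aungmin12/SpringEdge | src/springedge/edge.py | _parse_horizon_days
-- ===== SOURCE A (Python) =====
-- from typing import Any, Literal, Sequence
--
-- def _parse_horizon_days(values: Sequence[str] | None) -> tuple[int, ...] | None:
--     """
--     Accept either repeated ints (e.g. `--horizon-days 7 21`) or a single comma string (`--horizon-days 7,21`).
--     """
--     if not values:
--         return None
--     raw = ",".join([v.strip() for v in values if str(v).strip() != ""])
--     if not raw:
--         return None
--     parts = [p.strip() for p in raw.split(",") if p.strip()]
--     out: list[int] = []
--     for p in parts:
--         out.append(int(p))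
--     return tuple(out)
-- ===== SOURCE B (Python) =====
-- def _parse_horizon_days(values):
--     if not values:
--         return None
--     out = []
--     seen = False
--     for v in values:
--         s = v.strip()
--         if not s:
--             continue
--         seen = True
--         buf = []
--         for ch in s:
--             if ch == ',':
--                 tok = ''.join(buf).strip()
--                 if tok:
--                     out.append(int(tok))
--                 buf = []
--             else:
--                 buf.append(ch)
--         tok = ''.join(buf).strip()
--         if tok:
--             out.append(int(tok))
--     return tuple(out) if seen else None
-- ===== Notes on version B (the rewrite author's own statement) =====
-- stated objective: alternative
-- what changed: Replaces A's join-everything-into-one-string-then-resplit-and-filter pipeline with a single hand-rolled character-level tokenizer: one scan per value with an explicit buffer, flushing a token at each ',' and at end of value, converting as it goes.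
import Mathlib
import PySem

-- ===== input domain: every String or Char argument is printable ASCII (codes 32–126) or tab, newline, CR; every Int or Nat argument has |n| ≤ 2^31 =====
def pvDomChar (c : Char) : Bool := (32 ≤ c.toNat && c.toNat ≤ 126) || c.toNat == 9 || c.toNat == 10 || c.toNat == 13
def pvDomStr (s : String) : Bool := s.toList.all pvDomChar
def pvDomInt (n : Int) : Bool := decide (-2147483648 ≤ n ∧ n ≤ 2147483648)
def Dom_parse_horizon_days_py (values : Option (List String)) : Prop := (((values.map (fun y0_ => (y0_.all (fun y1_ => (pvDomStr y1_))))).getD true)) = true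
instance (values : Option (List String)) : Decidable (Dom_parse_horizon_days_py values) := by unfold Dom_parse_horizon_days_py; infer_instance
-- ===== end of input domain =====

-- B replaces A's join-into-one-string / resplit / comprehension pipeline with a
-- single character-level tokenizer (explicit buffer, flush at ',' and at end of
-- each value) — objective: an alternative, allocation-free traversal.

-- ===== PORT A =====
-- raw.split(",") with the literal nonempty separator ","; split? is some here, exact.
def pySplitCommaA (s : String) : List String := (PySem.Str.split? s ",").getD []

def parse_horizon_days_py (values : Option (List String)) : Option (List Int) :=
  match values with
  | none => none
  | some vs =>
    if vs = [] then none
    else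
      -- raw = ",".join([v.strip() for v in values if str(v).strip() != ""])
      let raw := PySem.Str.join ","
        ((vs.filter (fun v => PySem.Str.strip v ≠ "")).map (fun v => PySem.Str.strip v))
      if raw = "" then none
      else
        -- parts = [p.strip() for p in raw.split(",") if p.strip()]
        let parts := ((pySplitCommaA raw).filter (fun p => PySem.Str.strip p ≠ "")).map
          (fun p => PySem.Str.strip p)
        -- for p in parts: out.append(int(p))  -- int(p) raising ValueError ↦ none (excluded by Pre_)
        parts.foldl (fun acc p =>
          match acc with
          | none => none
          | some out =>
            match PySem.Int.ofStr? p with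
            | none => none
            | some n => some (out ++ [n])) (some [])

-- ===== PORT B =====
-- tok = ''.join(buf).strip(); if tok: out.append(int(tok))  -- int raising ↦ none (excluded by Pre_)
def flushTok (acc : Option (List Int)) (buf : List Char) : Option (List Int) :=
  if PySem.Str.strip (String.ofList buf) ≠ "" then
    match acc with
    | none => none
    | some out =>
      match PySem.Int.ofStr? (PySem.Str.strip (String.ofList buf)) with
      | none => none
      | some n => some (out ++ [n])
  else acc

def parse_horizon_days_py_alt (values : Option (List String)) : Option (List Int) :=
  match values with
  | none => none
  | some vs =>
    if vs = [] then none
    else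
      -- out/seen accumulator; per value: skip blanks, char scan with buffer, flush at ',' and at end
      let r := vs.foldl (fun (st : Option (List Int) × Bool) v =>
          let s := PySem.Str.strip v
          if s = "" then st
          else
            let q := s.toList.foldl (fun (p : Option (List Int) × List Char) ch =>
                if ch = ',' then (flushTok p.1 p.2, [])
                else (p.1, p.2 ++ [ch])) (st.1, [])
            (flushTok q.1 q.2, true)) (some [], false)
      if r.2 then r.1 else none

-- ===== PRECONDITION & SPEC =====
-- Pre_ excludes exactly the inputs where Python A raises ValueError: some stripped,
-- nonempty comma-piece of some value is not accepted by int().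
def Pre_parse_horizon_days_py (values : Option (List String)) : Prop :=
  match values with
  | none => True
  | some vs => ∀ v ∈ vs, ∀ p ∈ (PySem.Str.split? v ",").getD [],
      PySem.Str.strip p = "" ∨ (PySem.Int.ofStr? (PySem.Str.strip p)).isSome = true

instance (values : Option (List String)) : Decidable (Pre_parse_horizon_days_py values) := by
  unfold Pre_parse_horizon_days_py; cases values <;> infer_instance

def pvWitness_parse_horizon_days_py : Option (List String) := some ["7,21", " 3 ", "  "]

def Spec_parse_horizon_days_py (values : Option (List String)) (out : Option (List Int)) : Prop := out = parse_horizon_days_py_alt values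
instance (values : Option (List String)) (out : Option (List Int)) : Decidable (Spec_parse_horizon_days_py values out) := by unfold Spec_parse_horizon_days_py; infer_instance

-- ===== CLAIM (what is proved, stated in full; the proofs are below) =====
def Claim_equal_parse_horizon_days_py : Prop := ∀ (values : Option (List String)), Dom_parse_horizon_days_py values → Pre_parse_horizon_days_py values → Spec_parse_horizon_days_py values (parse_horizon_days_py values)

-- ===== LEMMAS AND PROOFS =====

theorem str_ext {s t : String} (h : s.toList = t.toList) : s = t := by
  simpa using congrArg String.ofList h

-- Structural model of splitting on the single character ','.
def mySplit : List Char → List (List Char)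
  | [] => [[]]
  | c :: rest =>
    if c = ',' then [] :: mySplit rest
    else (mySplit rest).modifyHead (fun h => c :: h)

theorem modifyHead_id' {α : Type} (l : List α) : List.modifyHead (fun h => h) l = l := by
  cases l <;> simp

theorem mySplit_ne_nil : ∀ l : List Char, mySplit l ≠ []
  | [] => by simp [mySplit]
  | c :: rest => by
    simp only [mySplit]
    split
    · simp
    · cases hh : mySplit rest with
      | nil => exact absurd hh (mySplit_ne_nil rest)
      | cons a b => simp [List.modifyHead]

theorem splitOn_go_eq (fuel : Nat) (l cur : List Char) (acc : List (List Char))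
    (h : l.length ≤ fuel) :
    PySem.Chars.splitOn.go [','] fuel l cur acc
      = acc.reverse ++ ((mySplit l).modifyHead (fun h => cur.reverse ++ h)) := by
  induction fuel generalizing l cur acc with
  | zero =>
    rw [PySem.Chars.splitOn.go.eq_def]
    have : l = [] := by cases l <;> simp_all
    subst this
    simp [mySplit]
  | succ fuel ih =>
    cases l with
    | nil =>
      rw [PySem.Chars.splitOn.go.eq_def]
      simp [mySplit]
    | cons c rest =>
      have hstep : PySem.Chars.splitOn.go [','] (fuel + 1) (c :: rest) cur acc
          = if [','].isPrefixOf (c :: rest) = true then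
              PySem.Chars.splitOn.go [','] fuel (List.drop [','].length (c :: rest)) []
                (cur.reverse :: acc)
            else PySem.Chars.splitOn.go [','] fuel rest (c :: cur) acc := rfl
      rw [hstep]
      by_cases hc : c = ','
      · subst hc
        have hpre : [','].isPrefixOf (',' :: rest) = true := by
          show (',' == ',' && List.isPrefixOf [] rest) = true
          simp [List.isPrefixOf]
        rw [if_pos hpre]
        have hdrop : List.drop [','].length (',' :: rest) = rest := rfl
        rw [hdrop, ih rest [] (cur.reverse :: acc) (by simpa using Nat.le_of_succ_le_succ h)]
        simp [mySplit, modifyHead_id']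
      · have hpre : [','].isPrefixOf (c :: rest) = false := by
          show (',' == c && List.isPrefixOf [] rest) = false
          have hbe : (',' == c) = false := beq_eq_false_iff_ne.mpr (Ne.symm hc)
          simp [hbe]
        rw [if_neg (by simp [hpre])]
        rw [ih rest (c :: cur) acc (by simpa using Nat.le_of_succ_le_succ h)]
        congr 1
        cases hh : mySplit rest with
        | nil => exact absurd hh (mySplit_ne_nil rest)
        | cons hd tl => simp [mySplit, hc, hh, List.modifyHead]

theorem splitOn_eq_mySplit (l : List Char) :
    PySem.Chars.splitOn l [','] = mySplit l := by
  unfold PySem.Chars.splitOn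
  rw [splitOn_go_eq (l.length + 1) l [] [] (Nat.le_succ _)]
  cases h : mySplit l with
  | nil => exact absurd h (mySplit_ne_nil l)
  | cons hd tl => simp [List.modifyHead]

theorem mySplit_append (a b : List Char) :
    mySplit (a ++ ',' :: b) = mySplit a ++ mySplit b := by
  induction a with
  | nil => simp [mySplit]
  | cons c a ih =>
    by_cases hc : c = ','
    · subst hc; simp [mySplit, ih]
    · simp only [List.cons_append, mySplit, if_neg hc, ih]
      cases hh : mySplit a with
      | nil => exact absurd hh (mySplit_ne_nil a)
      | cons hd tl => simp [List.modifyHead]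

theorem mySplit_no_comma (l : List Char) (h : ',' ∉ l) : mySplit l = [l] := by
  induction l with
  | nil => rfl
  | cons c rest ih =>
    have hc : c ≠ ',' := fun e => h (e ▸ List.mem_cons_self)
    simp [mySplit, hc, ih (fun m => h (List.mem_cons_of_mem _ m)), List.modifyHead]

theorem join_cons_cons' (x y : List Char) (t : List (List Char)) :
    PySem.Chars.join [','] (x :: y :: t) = x ++ ',' :: PySem.Chars.join [','] (y :: t) := by
  simp [PySem.Chars.join, List.intercalate]

theorem mySplit_join (parts : List (List Char)) (h : parts ≠ []) :
    mySplit (PySem.Chars.join [','] parts) = parts.flatMap mySplit := by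
  induction parts with
  | nil => exact absurd rfl h
  | cons x xs ih =>
    cases xs with
    | nil => simp [PySem.Chars.join, List.intercalate]
    | cons y t =>
      rw [join_cons_cons', mySplit_append, ih (by simp)]
      simp [List.flatMap]

theorem join_cons_ne_nil (x : List Char) (xs : List (List Char)) (hx : x ≠ []) :
    PySem.Chars.join [','] (x :: xs) ≠ [] := by
  cases xs with
  | nil => simpa [PySem.Chars.join, List.intercalate]
  | cons y t => rw [join_cons_cons']; simp [hx]

theorem sep_toList : (",".toList) = [','] := by decide

theorem toList_join_comma (kept : List String) :
    (PySem.Str.join "," kept).toList = PySem.Chars.join [','] (kept.map String.toList) := by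
  simp [PySem.Str.join, String.toList_ofList, sep_toList]

theorem chars_split_comma (l : List Char) : PySem.Chars.split? l [','] = some (mySplit l) := by
  simp [PySem.Chars.split?, splitOn_eq_mySplit]

theorem pySplitCommaA_eq (v : String) :
    pySplitCommaA v = (mySplit v.toList).map String.ofList := by
  simp [pySplitCommaA, PySem.Str.split?, sep_toList, chars_split_comma]

-- A's filter/map/fold over parts as a fold of flushTok over the raw chunks.
theorem foldl_filter_map {α β γ : Type} (P : α → Prop) [DecidablePred P] (f : α → β)
    (g : γ → β → γ) (l : List α) (a : γ) :
    ((l.filter (fun x => decide (P x))).map f).foldl g a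
      = l.foldl (fun a x => if P x then g a (f x) else a) a := by
  induction l generalizing a with
  | nil => rfl
  | cons x xs ih =>
    by_cases h : P x <;> simp [h, ih]

theorem foldl_filter_map_flush (pieces : List String) (a : Option (List Int)) :
    (((pieces.filter (fun p => PySem.Str.strip p ≠ "")).map (fun p => PySem.Str.strip p)).foldl
      (fun acc p =>
        match acc with
        | none => none
        | some out =>
          match PySem.Int.ofStr? p with
          | none => none
          | some n => some (out ++ [n])) a)
    = pieces.foldl (fun acc p => flushTok acc p.toList) a := by
  rw [foldl_filter_map (fun p => PySem.Str.strip p ≠ "") (fun p => PySem.Str.strip p)]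
  have hfun : ∀ (acc : Option (List Int)) (p : String),
      (if PySem.Str.strip p ≠ "" then
        (match acc with
        | none => none
        | some out =>
          match PySem.Int.ofStr? (PySem.Str.strip p) with
          | none => none
          | some n => some (out ++ [n]))
      else acc) = flushTok acc p.toList := by
    intro acc p
    simp only [flushTok, String.ofList_toList]
  simp only [hfun]

theorem flush_ofList (a : Option (List Int)) (pc : List Char) :
    flushTok a (String.ofList pc).toList = flushTok a pc := by
  simp [flushTok, String.toList_ofList]

-- B's per-value character machine equals folding flushTok over the ','-chunks.
theorem charMachine (l : List Char) (a : Option (List Int)) (buf : List Char)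
    (hb : ',' ∉ buf) :
    (let q := l.foldl (fun (p : Option (List Int) × List Char) ch =>
        if ch = ',' then (flushTok p.1 p.2, [])
        else (p.1, p.2 ++ [ch])) (a, buf)
     flushTok q.1 q.2) = (mySplit (buf ++ l)).foldl flushTok a := by
  induction l generalizing a buf with
  | nil =>
    simp only [List.foldl_nil, List.append_nil, mySplit_no_comma buf hb, List.foldl_cons,
      List.foldl_nil]
  | cons c rest ih =>
    by_cases hc : c = ','
    · subst hc
      simp only [List.foldl_cons, reduceIte]
      rw [ih (flushTok a buf) [] (by simp), mySplit_append]
      rw [mySplit_no_comma buf hb]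
      simp
    · simp only [List.foldl_cons, if_neg hc]
      have : buf ++ c :: rest = (buf ++ [c]) ++ rest := by simp
      rw [this, ← ih a (buf ++ [c]) (by simp [hb, Ne.symm hc])]

-- B's outer fold: out part is the nested chunk fold over kept, seen part is "kept ≠ []".
theorem outer_fold (vs : List String) (a : Option (List Int)) (s0 : Bool) :
    vs.foldl (fun (st : Option (List Int) × Bool) v =>
        let s := PySem.Str.strip v
        if s = "" then st
        else
          let q := s.toList.foldl (fun (p : Option (List Int) × List Char) ch =>
              if ch = ',' then (flushTok p.1 p.2, [])
              else (p.1, p.2 ++ [ch])) (st.1, [])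
          (flushTok q.1 q.2, true)) (a, s0)
    = (((vs.filter (fun v => PySem.Str.strip v ≠ "")).map (fun v => PySem.Str.strip v)).foldl
        (fun acc s => (mySplit s.toList).foldl flushTok acc) a,
       s0 || !((vs.filter (fun v => PySem.Str.strip v ≠ "")).isEmpty)) := by
  induction vs generalizing a s0 with
  | nil => simp
  | cons v rest ih =>
    by_cases h : PySem.Str.strip v = ""
    · simp only [List.foldl_cons, List.filter_cons, h]
      simpa [h] using ih a s0
    · simp only [List.foldl_cons, List.filter_cons, if_neg h]
      rw [ih]
      have hcm := charMachine (PySem.Str.strip v).toList a [] (by simp)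
      simp only [List.nil_append] at hcm
      simp only [PySem.Str.toList_strip] at hcm
      simp [h, hcm]

theorem foldl_flatMap' {α β γ : Type} (l : List α) (f : α → List β) (g : γ → β → γ) (a : γ) :
    (l.flatMap f).foldl g a = l.foldl (fun a x => (f x).foldl g a) a := by
  induction l generalizing a with
  | nil => rfl
  | cons x xs ih =>
    simp only [List.flatMap_cons, List.foldl_append, List.foldl_cons]
    exact ih _

-- ===== VERDICT (by name: the statement is the Claim_ definition above) =====
theorem parse_horizon_days_py_spec : Claim_equal_parse_horizon_days_py := by
  intro values _ _
  unfold Spec_parse_horizon_days_py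
  cases values with
  | none => rfl
  | some vs =>
    show parse_horizon_days_py (some vs) = parse_horizon_days_py_alt (some vs)
    unfold parse_horizon_days_py parse_horizon_days_py_alt
    by_cases hvs : vs = []
    · simp [hvs]
    · simp only [if_neg hvs]
      rw [outer_fold vs (some []) false]
      cases hkept : (vs.filter (fun v => PySem.Str.strip v ≠ "")).map (fun v => PySem.Str.strip v) with
      | nil =>
        have hraw0 : PySem.Str.join "," ([] : List String) = "" :=
          str_ext (by simp [PySem.Chars.join, List.intercalate])
        have hflt : vs.filter (fun v => PySem.Str.strip v ≠ "") = [] :=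
          List.map_eq_nil_iff.mp hkept
        simp [hraw0]
        intro v hv
        have := List.filter_eq_nil_iff.mp hflt v hv
        simpa using this
      | cons x xs =>
        have hxmem : x ∈ (vs.filter (fun v => PySem.Str.strip v ≠ "")).map (fun v => PySem.Str.strip v) := by
          rw [hkept]; exact List.mem_cons_self
        have hx : x ≠ "" := by
          obtain ⟨v, hv, rfl⟩ := List.mem_map.mp hxmem
          have := (List.mem_filter.mp hv).2
          simpa using this
        have hxl : x.toList ≠ [] := fun hnil => hx (str_ext (by simp [hnil]))
        have hraw : PySem.Str.join ","
            ((vs.filter (fun v => PySem.Str.strip v ≠ "")).map (fun v => PySem.Str.strip v)) ≠ "" := by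
          intro hcon
          have := congrArg String.toList hcon
          rw [toList_join_comma, hkept] at this
          simp only [List.map_cons] at this
          exact join_cons_ne_nil x.toList (xs.map String.toList) hxl (by simpa using this)
        have hfe : (vs.filter (fun v => PySem.Str.strip v ≠ "")).isEmpty = false := by
          cases hf : vs.filter (fun v => PySem.Str.strip v ≠ "") with
          | nil => rw [hf] at hkept; simp at hkept
          | cons _ _ => simp
        simp only [hkept] at hraw ⊢
        rw [if_neg hraw, hfe]
        -- A side: rewrite the parts fold into the nested chunk fold over kept
        rw [foldl_filter_map_flush]
        rw [pySplitCommaA_eq]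
        rw [List.foldl_map]
        have hjoin : (PySem.Str.join "," (x :: xs)).toList
            = PySem.Chars.join [','] ((x :: xs).map String.toList) := toList_join_comma _
        simp only [flush_ofList]
        rw [hjoin, mySplit_join _ (by simp)]
        rw [foldl_flatMap', List.foldl_map]
        simp
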